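-- pv_equiv track=rewrite | github.com/frank-895/science-bot | executor/executor/api.py | _requirement_name
-- ===== SOURCE A (Python) =====
-- def _requirement_name(requirement: str) -> str | None:
--     """Extract normalized package name from a requirement string.
--
--     Args:
--         requirement: Raw requirement string from package metadata.
--
--     Returns:
--         str | None: Normalized package name when parsing succeeds.
--     """
--     if not requirement:
--         return None
--
--     head = requirement.split(";", maxsplit=1)[0].strip()
--     if not head:
--         return None
--
--     split_tokens = ("<", ">", "=", "!", "~", "[", " ")
--     name = head
--     for token in split_tokens:
--         name = name.split(token, maxsplit=1)[0]
--     normalized = name.strip()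
--     return normalized or None
-- ===== SOURCE B (Python) =====
-- _DELIMS = set("<>=!~[ ")
--
--
-- def _requirement_name(requirement: str) -> str | None:
--     """Extract normalized package name from a requirement string."""
--     head = requirement.split(";", 1)[0].strip()
--     idx = next((i for i, c in enumerate(head) if c in _DELIMS), len(head))
--     name = head[:idx].strip()
--     return name or None
-- ===== Notes on version B (the rewrite author's own statement) =====
-- stated objective: simpler
-- what changed: Replaces the chain of seven sequential split(token,1)[0] passes (each allocating an intermediate string) with a single scan that finds the index of the first delimiter character and slices once.
import Mathlib
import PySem

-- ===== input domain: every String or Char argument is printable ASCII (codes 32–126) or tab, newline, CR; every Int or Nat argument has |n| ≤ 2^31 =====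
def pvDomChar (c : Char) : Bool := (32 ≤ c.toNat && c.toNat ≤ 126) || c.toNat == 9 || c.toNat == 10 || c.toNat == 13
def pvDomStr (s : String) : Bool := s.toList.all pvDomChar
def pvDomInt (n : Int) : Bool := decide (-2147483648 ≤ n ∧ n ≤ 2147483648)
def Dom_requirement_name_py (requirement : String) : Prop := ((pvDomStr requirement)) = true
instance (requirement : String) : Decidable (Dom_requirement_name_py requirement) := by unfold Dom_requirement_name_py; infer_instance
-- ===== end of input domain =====

-- B replaces A's chain of seven sequential split-and-keep-prefix passes by a single scan for the
-- index of the first delimiter character followed by one slice (objective: simpler).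

-- ===== PORT A =====
def requirement_name_py (requirement : String) : Option String :=
  if requirement = "" then none
  else
    let head := PySem.Str.strip (((PySem.Str.splitMax? requirement ";" 1).getD []).headD "")
    if head = "" then none
    else
      let splitTokens : List String := ["<", ">", "=", "!", "~", "[", " "]
      let name := splitTokens.foldl (fun n t => ((PySem.Str.splitMax? n t 1).getD []).headD "") head
      let normalized := PySem.Str.strip name
      if normalized = "" then none else some normalized

-- ===== PORT B =====
def requirement_name_py_alt (requirement : String) : Option String :=
  let head := PySem.Str.strip (((PySem.Str.splitMax? requirement ";" 1).getD []).headD "")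
  let delims : List Char := ['<', '>', '=', '!', '~', '[', ' ']
  let idx := head.toList.findIdx (fun c => delims.contains c)
  let name := PySem.Str.strip (String.ofList (head.toList.take idx))
  if name = "" then none else some name

-- ===== PRECONDITION & SPEC =====
def Spec_requirement_name_py (requirement : String) (out : Option String) : Prop := out = requirement_name_py_alt requirement
instance (requirement : String) (out : Option String) : Decidable (Spec_requirement_name_py requirement out) := by unfold Spec_requirement_name_py; infer_instance

-- ===== CLAIM (what is proved, stated in full; the proofs are below) =====
def Claim_equal_requirement_name_py : Prop := ∀ (requirement : String), Dom_requirement_name_py requirement → Spec_requirement_name_py requirement (requirement_name_py requirement)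

-- ===== LEMMAS AND PROOFS =====

theorem pv_go_shape (sep : List Char) (fuel m : Nat) (l cur : List Char) (acc : List (List Char)) :
    ∃ t, t ≠ [] ∧ PySem.Chars.splitOnMax.go sep fuel m l cur acc = acc.reverse ++ t := by
  induction fuel generalizing m l cur acc with
  | zero => exact ⟨[cur.reverse ++ l], by simp, by simp [PySem.Chars.splitOnMax.go]⟩
  | succ f ih =>
    cases l with
    | nil => exact ⟨[cur.reverse], by simp, by simp [PySem.Chars.splitOnMax.go]⟩
    | cons c rest =>
      by_cases hm : m = 0
      · exact ⟨[cur.reverse ++ (c :: rest)], by simp, by simp [PySem.Chars.splitOnMax.go, hm]⟩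
      · by_cases hp : sep.isPrefixOf (c :: rest) = true
        · obtain ⟨t, ht, he⟩ := ih (m - 1) (List.drop sep.length (c :: rest)) [] (cur.reverse :: acc)
          exact ⟨cur.reverse :: t, by simp, by simp [PySem.Chars.splitOnMax.go, hm, hp, he]⟩
        · obtain ⟨t, ht, he⟩ := ih m rest (c :: cur) acc
          exact ⟨t, ht, by simp [PySem.Chars.splitOnMax.go, hm, hp, he]⟩

theorem pv_go_first (c : Char) (fuel m : Nat) (l cur : List Char) (acc : List (List Char))
    (hf : l.length < fuel) (hm : m ≠ 0) :
    ∃ t, PySem.Chars.splitOnMax.go [c] fuel m l cur acc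
        = acc.reverse ++ (cur.reverse ++ l.takeWhile (fun x => x ≠ c)) :: t := by
  induction fuel generalizing m l cur acc with
  | zero => omega
  | succ f ih =>
    cases l with
    | nil => exact ⟨[], by simp [PySem.Chars.splitOnMax.go]⟩
    | cons c' rest =>
      by_cases hp : [c].isPrefixOf (c' :: rest) = true
      · have hc : c' = c := by
          have h2 := hp
          simp [List.isPrefixOf] at h2
          exact h2.symm
        obtain ⟨t, ht, he⟩ := pv_go_shape [c] f (m - 1) (List.drop [c].length (c' :: rest)) [] (cur.reverse :: acc)
        simp only [List.length_cons, List.length_nil, List.drop_succ_cons, List.drop_zero] at he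
        refine ⟨t, ?_⟩
        simp [PySem.Chars.splitOnMax.go, hm, hp, hc]
        simpa using he
      · have hc : ¬ c' = c := by
          intro h; exact hp (by simp [h, List.isPrefixOf])
        obtain ⟨t, he⟩ := ih m rest (c' :: cur) acc (by simpa using Nat.lt_of_succ_lt_succ hf) hm
        refine ⟨t, ?_⟩
        simp [PySem.Chars.splitOnMax.go, hm, hp, he, hc]

theorem pv_split_head (s t : String) (c : Char) (ht : t.toList = [c]) :
    ((PySem.Str.splitMax? s t 1).getD []).headD ""
      = String.ofList (s.toList.takeWhile (fun x => x ≠ c)) := by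
  obtain ⟨tl, he⟩ := pv_go_first c (s.toList.length + 1) 1 s.toList [] [] (by omega) (by omega)
  simp only [List.reverse_nil, List.nil_append] at he
  simp [PySem.Str.splitMax?, PySem.Chars.splitMax?, PySem.Chars.splitOnMax, ht]
  simp at he
  rw [he]
  simp

theorem pv_take_findIdx {α : Type} (p : α → Bool) (l : List α) :
    l.take (l.findIdx p) = l.takeWhile (fun a => ! p a) := by
  induction l with
  | nil => rfl
  | cons a l ih =>
    by_cases h : p a = true
    · simp [List.findIdx_cons, h]
    · have h' : p a = false := by simpa using h
      simp [List.findIdx_cons, h', ih]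

theorem pv_takeWhile_takeWhile {α : Type} (p q : α → Bool) (l : List α) :
    (l.takeWhile p).takeWhile q = l.takeWhile (fun a => p a && q a) := by
  induction l with
  | nil => rfl
  | cons a l ih =>
    by_cases h : p a = true
    · by_cases h' : q a = true
      · simp [List.takeWhile_cons, h, h', ih]
      · simp [List.takeWhile_cons, h, h']
    · have h2 : p a = false := by simpa using h
      simp [List.takeWhile_cons, h2]

theorem pv_chain (hd : String) :
    List.foldl (fun n t => ((PySem.Str.splitMax? n t 1).getD []).headD "") hd ["<", ">", "=", "!", "~", "[", " "]
      = String.ofList (hd.toList.take (hd.toList.findIdx (fun c => (['<', '>', '=', '!', '~', '[', ' '] : List Char).contains c))) := by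
  simp only [List.foldl_cons, List.foldl_nil]
  rw [pv_split_head hd "<" '<' rfl]
  rw [pv_split_head _ ">" '>' rfl]
  rw [pv_split_head _ "=" '=' rfl]
  rw [pv_split_head _ "!" '!' rfl]
  rw [pv_split_head _ "~" '~' rfl]
  rw [pv_split_head _ "[" '[' rfl]
  rw [pv_split_head _ " " ' ' rfl]
  rw [pv_take_findIdx]
  simp only [String.toList_ofList, pv_takeWhile_takeWhile]
  congr 2
  funext a
  have hb : ∀ (x y : Char), (x == y) = decide (x = y) := fun x y => rfl
  simp only [List.contains_cons, List.contains_nil, Bool.or_false, Bool.not_or, decide_not,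
    Bool.and_assoc, hb]

theorem pv_final (requirement : String) : requirement_name_py requirement = requirement_name_py_alt requirement := by
  by_cases h0 : requirement = ""
  · subst h0; decide
  · unfold requirement_name_py requirement_name_py_alt
    rw [if_neg h0]
    set hd := PySem.Str.strip (((PySem.Str.splitMax? requirement ";" 1).getD []).headD "") with hhd
    by_cases h1 : hd = ""
    · rw [if_pos h1]
      simp only [h1]
      decide
    · rw [if_neg h1]
      simp only [pv_chain hd]

-- ===== VERDICT (by name: the statement is the Claim_ definition above) =====
theorem requirement_name_py_spec : Claim_equal_requirement_name_py := by
  intro requirement _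
  unfold Spec_requirement_name_py
  exact pv_final requirement
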